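-- pv_equiv track=rewrite | github.com/sqoshi/metaheuristic-alghoritms | List_03/task_02/limited_dict/__init__.py | quality
-- ===== SOURCE A (Python) =====
-- def quality(word, dictionary):
--     """
--     Quality Function
--     Maximalizes as in given multiset
--     :param word:
--     :param dictionary:
--     :return:
--     """
--     summary = 0
--     for char in word:
--         try:
--             summary += dictionary[char]
--         except KeyError:
--             raise ValueError('Quality function tried to compare word with symbol outside the dictionary')
--     return summary
-- ===== SOURCE B (Python) =====
-- def quality(word, dictionary):
--     """Two-pass re-implementation: validate all characters first, then sum."""
--     missing = [c for c in word if c not in dictionary]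
--     if missing:
--         raise ValueError('Quality function tried to compare word with symbol outside the dictionary')
--     return sum(dictionary[c] for c in word)
-- ===== Notes on version B (the rewrite author's own statement) =====
-- stated objective: alternative
-- what changed: Replaced the single loop with an inline try/except KeyError by two separate passes: a validation pass collecting characters missing from the dictionary (raising the same ValueError if any), then a pure summation pass; equivalence is claimed under Pre_ (every character of word is a dictionary key), outside of which both raise.
import Mathlib
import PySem

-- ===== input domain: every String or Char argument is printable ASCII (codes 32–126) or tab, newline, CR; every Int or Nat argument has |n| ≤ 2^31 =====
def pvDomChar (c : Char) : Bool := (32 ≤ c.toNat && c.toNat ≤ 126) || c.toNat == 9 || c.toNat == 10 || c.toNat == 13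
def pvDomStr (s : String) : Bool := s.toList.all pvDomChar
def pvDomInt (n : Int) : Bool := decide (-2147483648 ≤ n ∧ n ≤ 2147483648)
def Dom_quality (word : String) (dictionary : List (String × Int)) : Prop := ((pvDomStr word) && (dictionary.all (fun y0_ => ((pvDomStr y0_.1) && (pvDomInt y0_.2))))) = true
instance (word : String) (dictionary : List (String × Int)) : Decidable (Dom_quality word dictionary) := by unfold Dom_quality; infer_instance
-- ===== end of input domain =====

-- B replaces A's single try/except lookup loop with two separate passes (validate all characters, then sum); same results and same exception, no speed claim.


-- dictionary[char]: first-match lookup of the one-character string in the association list (shared lookup primitive)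
def pvLookup (dictionary : List (String × Int)) (c : Char) : Option Int :=
  (dictionary.find? (fun p => p.1 == String.mk [c])).map (·.2)

-- ===== PORT A =====
-- A's for-loop: accumulate summary; a KeyError (lookup = none) aborts (A raises ValueError there; excluded by Pre_)
def qualityLoop (dictionary : List (String × Int)) : List Char → Int → Option Int
  | [], summary => some summary
  | c :: cs, summary =>
    match pvLookup dictionary c with
    | some v => qualityLoop dictionary cs (summary + v)
    | none => none

def quality (word : String) (dictionary : List (String × Int)) : Int :=
  (qualityLoop dictionary word.toList 0).getD 0

-- ===== PORT B =====
-- pass 1: collect missing characters (B raises there; excluded by Pre_); pass 2: sum the looked-up weights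
def quality_alt (word : String) (dictionary : List (String × Int)) : Int :=
  let missing := word.toList.filter (fun c => (pvLookup dictionary c).isNone)
  if missing.isEmpty then (word.toList.map (fun c => (pvLookup dictionary c).getD 0)).sum
  else 0

-- ===== PRECONDITION & SPEC =====
-- Pre_ excludes exactly the inputs where some character of word is not a dictionary key: there A raises ValueError (and B raises the same).
def Pre_quality (word : String) (dictionary : List (String × Int)) : Prop :=
  (word.toList.all (fun c => (pvLookup dictionary c).isSome)) = true
instance (word : String) (dictionary : List (String × Int)) : Decidable (Pre_quality word dictionary) := by unfold Pre_quality; infer_instance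

def pvWitness_quality : String × (List (String × Int)) := ("a", [("a", 1)])

def Spec_quality (word : String) (dictionary : List (String × Int)) (out : Int) : Prop := out = quality_alt word dictionary
instance (word : String) (dictionary : List (String × Int)) (out : Int) : Decidable (Spec_quality word dictionary out) := by unfold Spec_quality; infer_instance

-- ===== CLAIM (what is proved, stated in full; the proofs are below) =====
def Claim_equal_quality : Prop := ∀ (word : String) (dictionary : List (String × Int)), Dom_quality word dictionary → Pre_quality word dictionary → Spec_quality word dictionary (quality word dictionary)

-- ===== LEMMAS AND PROOFS =====
theorem qualityLoop_eq_sum (d : List (String × Int)) (l : List Char) (s : Int)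
    (h : ∀ c ∈ l, (pvLookup d c).isSome = true) :
    qualityLoop d l s = some (s + (l.map (fun c => (pvLookup d c).getD 0)).sum) := by
  induction l generalizing s with
  | nil => simp [qualityLoop]
  | cons c cs ih =>
    have hc : (pvLookup d c).isSome = true := h c (by simp)
    obtain ⟨v, hv⟩ := Option.isSome_iff_exists.mp hc
    simp only [qualityLoop, hv]
    rw [ih _ (fun x hx => h x (by simp [hx]))]
    simp [hv, add_assoc]

-- ===== VERDICT (by name: the statement is the Claim_ definition above) =====
theorem quality_spec : Claim_equal_quality := by
  intro word dictionary _ hpre'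
  have hpre : ∀ c ∈ word.toList, (pvLookup dictionary c).isSome = true :=
    List.all_eq_true.mp hpre'
  unfold Spec_quality quality quality_alt
  have hf : word.toList.filter (fun c => (pvLookup dictionary c).isNone) = [] := by
    rw [List.filter_eq_nil_iff]
    intro c hc
    have := hpre c hc
    simp [Option.isNone_iff_eq_none, Option.isSome_iff_ne_none] at *
    exact this
  rw [qualityLoop_eq_sum dictionary word.toList 0 hpre]
  simp [hf]
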